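-- pv_equiv track=rewrite | github.com/thiagopelizoni/MathChallenges | src/problem_224.py | roots_prime_power
-- ===== SOURCE A (Python) =====
-- def sqrt_minus_one_prime(p):
--     z = 2
--     while pow(z, (p - 1) // 2, p) != p - 1:
--         z += 1
--     return pow(z, (p - 1) // 4, p)
--
-- def roots_prime_power(p, e):
--     q = p**e
--     if p % 4 == 3:
--         return [], q
--
--     r = sqrt_minus_one_prime(p)
--     mod = p
--     for _ in range(1, e):
--         t = (-((r * r + 1) // mod) * pow(2 * r, -1, p)) % p
--         r += t * mod
--         mod *= p
--     return [r, q - r], q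
-- ===== SOURCE B (Python) =====
-- def roots_prime_power(p, e):
--     q = p ** e
--     if p % 4 == 3:
--         return [], q
--     # least z failing the Euler residue test gives the base root z^((p-1)/4) mod p
--     z = 2
--     while pow(z, (p - 1) // 2, p) != p - 1:
--         z += 1
--     r = pow(z, (p - 1) // 4, p)
--     # Newton (quadratic) Hensel lifting: precision doubles each round
--     m = p
--     while m < q:
--         m2 = m * m
--         r = (r - (r * r + 1) * pow(2 * r, -1, m2)) % m2
--         m = m2
--     r %= q
--     return [r, (q - r) % q], q
-- ===== Notes on version B (the rewrite author's own statement) =====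
-- stated objective: alternative
-- what changed: The linear Hensel loop that lifts the root of x^2+1 one power of p per iteration is replaced by Newton's quadratic lifting, which squares the modulus each round (O(log e) rounds instead of e-1 iterations) and reduces the final root modulo q; the non-residue search is kept.
-- intended difference: For e = 0 with p a prime ≡ 1 (mod 4), A returns its base root unreduced modulo q = 1 (e.g. ([2, -1], 1) at p = 5), while B returns ([0, 0], 1), the canonical residues modulo 1, which is the intended value. — e.g. on roots_prime_power(5, 0): A returns ([2, -1], 1), B returns ([0, 0], 1)
-- outside the precondition, e.g. on roots_prime_power(1, 1): A returns ([0, 1], 1), B returns ([0, 0], 1); on roots_prime_power(2, 1): A returns ([1, 1], 2), B returns ([1, 1], 2)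
import Mathlib
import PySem

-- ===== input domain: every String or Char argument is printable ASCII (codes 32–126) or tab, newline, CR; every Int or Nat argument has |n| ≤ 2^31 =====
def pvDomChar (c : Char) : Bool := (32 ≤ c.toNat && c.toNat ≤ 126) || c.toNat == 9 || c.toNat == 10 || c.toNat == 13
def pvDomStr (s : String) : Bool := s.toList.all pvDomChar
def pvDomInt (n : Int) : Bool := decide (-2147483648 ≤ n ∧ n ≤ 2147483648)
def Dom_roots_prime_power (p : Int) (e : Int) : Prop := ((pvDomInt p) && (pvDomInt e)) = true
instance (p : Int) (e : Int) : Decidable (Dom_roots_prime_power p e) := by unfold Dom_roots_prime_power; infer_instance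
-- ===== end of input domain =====

-- B replaces A's linear Hensel loop (one power of p per iteration) by Newton lifting that
-- squares the modulus each round, reducing the final root modulo q (objective: alternative).

-- ===== PORT A =====
-- python builtin pow(a, -1, m): exact when Int.gcd a m = 1 and 0 < m (otherwise Python raises ValueError)
def pyInvMod (a m : Int) : Int := PySem.Int.mod (Int.gcdA a m) m

-- the `while` of sqrt_minus_one_prime: first z ≥ 2 with pow(z,(p-1)//2,p) == p-1; the fuel only
-- makes it total (inside Pre_ a witness exists below p, so the fuel is never exhausted)
def pvFindZ (p : Int) (h : Nat) : Nat → Int → Int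
  | 0, z => z
  | f+1, z => if PySem.Int.powMod z h p ≠ p - 1 then pvFindZ p h f (z+1) else z

def sqrt_minus_one_prime (p : Int) : Int :=
  let z := pvFindZ p ((PySem.Int.floordiv (p - 1) 2).toNat) (p.toNat + 1) 2
  PySem.Int.powMod z ((PySem.Int.floordiv (p - 1) 4).toNat) p

def roots_prime_power (p : Int) (e : Int) : List Int × Int :=
  let q := p ^ e.toNat    -- p**e; exact for 0 ≤ e (Pre_); Python yields a float for e < 0
  if PySem.Int.mod p 4 = 3 then ([], q)
  else
    let r0 := sqrt_minus_one_prime p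
    let s := (PySem.List.pyRange 1 e 1).foldl (fun (s : Int × Int) _ =>
      let t := PySem.Int.mod (-(PySem.Int.floordiv (s.1 * s.1 + 1) s.2) * pyInvMod (2 * s.1) p) p
      (s.1 + t * s.2, s.2 * p)) (r0, p)
    ([s.1, q - s.1], q)

-- ===== PORT B =====
-- the `while m < q` Newton loop of Source B; its fuel e.toNat only makes it total (the modulus is
-- squared each round, so e.toNat rounds always reach m ≥ q = p^e)
def pvNewtonLift (q : Int) : Nat → Int → Int → Int
  | 0, r, _ => r
  | f+1, r, m =>
    if m < q then
      let m2 := m * m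
      pvNewtonLift q f (PySem.Int.mod (r - (r * r + 1) * pyInvMod (2 * r) m2) m2) m2
    else r

def roots_prime_power_alt (p : Int) (e : Int) : List Int × Int :=
  let q := p ^ e.toNat    -- p**e; exact for 0 ≤ e (Pre_)
  if PySem.Int.mod p 4 = 3 then ([], q)
  else
    let z := pvFindZ p ((PySem.Int.floordiv (p - 1) 2).toNat) (p.toNat + 1) 2
    let r0 := PySem.Int.powMod z ((PySem.Int.floordiv (p - 1) 4).toNat) p
    let r1 := pvNewtonLift q e.toNat r0 p
    let r := PySem.Int.mod r1 q
    ([r, PySem.Int.mod (q - r) q], q)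

-- ===== PRECONDITION & SPEC =====
-- Pre_ excludes e < 0 (Python's p**e is a float there, so A's result leaves the declared type) and
-- bases p with p % 4 ≠ 3 that are not primes ≡ 1 (mod 4): on almost all of those A diverges in the
-- non-residue search or raises ValueError in pow(·,-1,·); its returns at stray non-prime bases
-- such as p = 1 are accidental values of the search loop.
def Pre_roots_prime_power (p : Int) (e : Int) : Prop :=
  0 ≤ e ∧ (PySem.Int.mod p 4 = 3 ∨ (PySem.Int.mod p 4 = 1 ∧ Nat.Prime p.toNat))
instance (p : Int) (e : Int) : Decidable (Pre_roots_prime_power p e) := by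
  unfold Pre_roots_prime_power; infer_instance
def pvWitness_roots_prime_power : Int × Int := (5, 1)

-- For e = 0 with p a prime ≡ 1 (mod 4), A returns its base root unreduced modulo q = 1
-- (e.g. ([2, -1], 1) at p = 5), while B returns ([0, 0], 1), the canonical residues modulo 1,
-- which is the intended value.
def D_roots_prime_power (p : Int) (e : Int) : Prop :=
  e = 0 ∧ PySem.Int.mod p 4 = 1 ∧ Nat.Prime p.toNat
instance (p : Int) (e : Int) : Decidable (D_roots_prime_power p e) := by
  unfold D_roots_prime_power; infer_instance

def Spec_roots_prime_power (p : Int) (e : Int) (out : List Int × Int) : Prop :=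
  ¬ D_roots_prime_power p e → out = roots_prime_power_alt p e
instance (p : Int) (e : Int) (out : List Int × Int) : Decidable (Spec_roots_prime_power p e out) := by
  unfold Spec_roots_prime_power; infer_instance

def pvDiffWitness_roots_prime_power : Int × Int := (5, 0)
def pvDiffWitnessOut_roots_prime_power : (List Int × Int) × (List Int × Int) :=
  (([2, -1], 1), ([0, 0], 1))

-- ===== CLAIM (what is proved, stated in full; the proofs are below) =====
def Claim_unchanged_roots_prime_power : Prop := ∀ (p : Int) (e : Int), Dom_roots_prime_power p e → Pre_roots_prime_power p e → Spec_roots_prime_power p e (roots_prime_power p e)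
def Claim_changed_roots_prime_power : Prop := Dom_roots_prime_power (pvDiffWitness_roots_prime_power.1) (pvDiffWitness_roots_prime_power.2) ∧ Pre_roots_prime_power (pvDiffWitness_roots_prime_power.1) (pvDiffWitness_roots_prime_power.2) ∧ D_roots_prime_power (pvDiffWitness_roots_prime_power.1) (pvDiffWitness_roots_prime_power.2) ∧ roots_prime_power (pvDiffWitness_roots_prime_power.1) (pvDiffWitness_roots_prime_power.2) = pvDiffWitnessOut_roots_prime_power.1 ∧ roots_prime_power_alt (pvDiffWitness_roots_prime_power.1) (pvDiffWitness_roots_prime_power.2) = pvDiffWitnessOut_roots_prime_power.2 ∧ pvDiffWitnessOut_roots_prime_power.1 ≠ pvDiffWitnessOut_roots_prime_power.2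
def Claim_exact_roots_prime_power : Prop := ∀ (p : Int) (e : Int), Dom_roots_prime_power p e → Pre_roots_prime_power p e → D_roots_prime_power p e → roots_prime_power p e ≠ roots_prime_power_alt p e

-- ===== LEMMAS AND PROOFS =====
theorem pymod_pos (a m : Int) (h : 0 < m) : PySem.Int.mod a m = a % m := by
  simpa [PySem.Int.mod] using Int.fmod_eq_emod_of_nonneg a h.le

theorem pyInvMod_mul (a m : Int) (h : 0 < m) (hc : IsCoprime a m) :
    a * pyInvMod a m % m = 1 % m := by
  have hg : Int.gcd a m = 1 := Int.isCoprime_iff_gcd_eq_one.mp hc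
  have hb : (1 : Int) = a * Int.gcdA a m + m * Int.gcdB a m := by
    have := Int.gcd_eq_gcd_ab a m
    rw [hg] at this; simpa using this
  rw [pyInvMod, pymod_pos _ _ h, Int.mul_emod, Int.emod_emod_of_dvd _ dvd_rfl, ← Int.mul_emod]
  conv_rhs => rw [hb]
  rw [Int.add_mul_emod_self_left]

theorem dvd_sq_emod (q x : Int) (h : q ∣ x * x + 1) : q ∣ x % q * (x % q) + 1 := by
  have h1 : Int.ModEq q (x % q) x := Int.emod_emod_of_dvd x dvd_rfl
  have h2 : Int.ModEq q (x % q * (x % q) + 1) (x * x + 1) := (h1.mul h1).add_right 1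
  have h3 := dvd_sub h h2.dvd
  simpa [add_comm] using h3

theorem emod_eq_val (p : Int) (hp : 0 < p) (x : Int) :
    x % p = ((x : ZMod p.toNat).val : Int) := by
  haveI : NeZero p.toNat := ⟨by omega⟩
  rw [ZMod.val_intCast, Int.toNat_of_nonneg hp.le]

theorem len_pyRange (e : Int) (he : 1 ≤ e) :
    (PySem.List.pyRange 1 e 1).length = (e - 1).toNat := by
  rcases eq_or_lt_of_le he with h | h
  · simp [PySem.List.pyRange, ← h]
  · simp [PySem.List.pyRange, h]

theorem pypow_pos (z : Int) (n : Nat) (p : Int) (h : 0 < p) :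
    PySem.Int.powMod z n p = z ^ n % p := by
  simp [PySem.Int.powMod, pymod_pos _ _ h]

theorem pvFindZ_spec (p : Int) (h : Nat) :
    ∀ (f : Nat) (z : Int), (∃ k : Nat, k < f ∧ PySem.Int.powMod (z + (k : Int)) h p = p - 1) →
      PySem.Int.powMod (pvFindZ p h f z) h p = p - 1 := by
  intro f
  induction f with
  | zero => rintro z ⟨k, hk, _⟩; omega
  | succ f ih =>
    rintro z ⟨k, hk, hcond⟩
    rw [pvFindZ]
    split_ifs with hz
    · apply ih
      rcases k with _ | k
      · simp at hcond; exact absurd hcond hz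
      · exact ⟨k, by omega, by push_cast at hcond ⊢; convert hcond using 2; ring⟩
    · simpa using not_ne_iff.mp hz

theorem coprime_two_mul (p r : Int) (hp5 : 5 ≤ p) (hP : Prime p) (hd : p ∣ r * r + 1)
    (n : Nat) : IsCoprime (2 * r) (p ^ n) := by
  have hnd : ¬ p ∣ 2 * r := by
    intro hdvd
    rcases hP.dvd_mul.mp hdvd with h2 | hr
    · have := Int.le_of_dvd (by norm_num) h2; omega
    · have h1 : p ∣ r * r := hr.mul_left r
      have hone : p ∣ 1 := by
        have := dvd_sub hd h1
        simpa using this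
      have := Int.le_of_dvd (by norm_num) hone; omega
  exact ((hP.coprime_iff_not_dvd.mpr hnd).pow_left).symm

theorem exists_nonresidue (p : Int) (hp5 : 5 ≤ p) (hp4 : p % 4 = 1) (hP : Nat.Prime p.toNat) :
    ∃ k : Nat, k < p.toNat + 1 ∧
      PySem.Int.powMod (2 + (k : Int)) ((PySem.Int.floordiv (p - 1) 2).toNat) p = p - 1 := by
  have hp0 : (0:Int) < p := by omega
  have hPv : (p.toNat : Int) = p := Int.toNat_of_nonneg hp0.le
  haveI : Fact p.toNat.Prime := ⟨hP⟩
  have hchar : ringChar (ZMod p.toNat) ≠ 2 := by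
    rw [ZMod.ringChar_zmod_n]; omega
  obtain ⟨b, hb⟩ := FiniteField.exists_nonsquare hchar
  have hb0 : b ≠ 0 := fun h => hb (h ▸ ⟨0, by ring⟩)
  have hbpow : b ^ (p.toNat / 2) = -1 := by
    rcases ZMod.pow_div_two_eq_neg_one_or_one p.toNat hb0 with h | h
    · exact absurd ((ZMod.euler_criterion p.toNat hb0).mpr h) hb
    · exact h
  have hv2 : 2 ≤ b.val := by
    rcases Nat.lt_or_ge b.val 2 with h | h
    · interval_cases hval : b.val
      · exact absurd ((ZMod.val_eq_zero b).mp hval) hb0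
      · exfalso
        apply hb
        have : b = 1 := by
          have := ZMod.natCast_rightInverse (n := p.toNat) b
          rw [hval] at this; simpa using this.symm
        exact this ▸ ⟨1, by ring⟩
    · exact h
  have hvlt : b.val < p.toNat := ZMod.val_lt b
  refine ⟨b.val - 2, by omega, ?_⟩
  have hz : (2 : Int) + ((b.val - 2 : Nat) : Int) = (b.val : Int) := by omega
  have hh : ((PySem.Int.floordiv (p - 1) 2).toNat) = p.toNat / 2 := by
    rw [PySem.Int.floordiv, Int.fdiv_eq_ediv_of_nonneg _ (by norm_num)]
    omega
  rw [hz, hh, pypow_pos _ _ _ hp0, emod_eq_val p hp0]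
  have hcast : (((b.val : Int) ^ (p.toNat / 2) : Int) : ZMod p.toNat) = b ^ (p.toNat / 2) := by
    push_cast
    rw [ZMod.natCast_rightInverse b]
  rw [hcast, hbpow]
  have : ((-1 : Int) : ZMod p.toNat) = -1 := by push_cast; ring
  rw [← this, ← emod_eq_val p hp0]
  have : ((-1 : Int)) % p = (p - 1 + p * (-1)) % p := by ring_nf
  rw [this, Int.add_mul_emod_self_left, Int.emod_eq_of_lt (by omega) (by omega)]

theorem r0_spec (p : Int) (hp5 : 5 ≤ p) (hp4 : p % 4 = 1) (hP : Nat.Prime p.toNat) :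
    0 ≤ sqrt_minus_one_prime p ∧ sqrt_minus_one_prime p < p ∧
      p ∣ sqrt_minus_one_prime p * sqrt_minus_one_prime p + 1 := by
  have hp0 : (0:Int) < p := by omega
  have hcond := pvFindZ_spec p ((PySem.Int.floordiv (p - 1) 2).toNat) (p.toNat + 1) 2
    (exists_nonresidue p hp5 hp4 hP)
  set z := pvFindZ p ((PySem.Int.floordiv (p - 1) 2).toNat) (p.toNat + 1) 2 with hz
  have hr0 : sqrt_minus_one_prime p = z ^ ((PySem.Int.floordiv (p - 1) 4).toNat) % p := by
    rw [sqrt_minus_one_prime, ← hz, pypow_pos _ _ _ hp0]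
  have hh : ((PySem.Int.floordiv (p - 1) 2).toNat) = 2 * ((PySem.Int.floordiv (p - 1) 4).toNat) := by
    simp only [PySem.Int.floordiv, Int.fdiv_eq_ediv_of_nonneg _ (by norm_num : (0:Int) ≤ 2),
      Int.fdiv_eq_ediv_of_nonneg _ (by norm_num : (0:Int) ≤ 4)]
    omega
  refine ⟨by rw [hr0]; exact Int.emod_nonneg _ hp0.ne', by rw [hr0]; exact Int.emod_lt_of_pos _ hp0, ?_⟩
  rw [pypow_pos _ _ _ hp0, hh] at hcond
  have hsq : sqrt_minus_one_prime p * sqrt_minus_one_prime p % p = p - 1 := by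
    rw [hr0, ← Int.mul_emod, ← pow_add, ← two_mul]
    exact hcond
  have h1p : (1:Int) % p = 1 := Int.emod_eq_of_lt (by norm_num) (by omega)
  rw [Int.dvd_iff_emod_eq_zero, Int.add_emod, hsq, h1p]
  have : p - 1 + 1 = p := by ring
  rw [this, Int.emod_self]

theorem unique_root (p q x y : Int) (hp5 : 5 ≤ p) (hP : Prime p) (en : Nat) (hen : 1 ≤ en)
    (hq : q = p ^ en) (hx0 : 0 ≤ x) (hxq : x < q) (hy0 : 0 ≤ y) (hyq : y < q)
    (hdx : q ∣ x * x + 1) (hdy : q ∣ y * y + 1) (hmod : x % p = y % p) : x = y := by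
  have hpq : p ∣ q := hq ▸ dvd_pow_self p (by omega)
  have hdxy : q ∣ (x - y) * (x + y) := by
    have := dvd_sub hdx hdy
    have h2 : x * x + 1 - (y * y + 1) = (x - y) * (x + y) := by ring
    rwa [h2] at this
  have hxy : p ∣ x - y := Int.ModEq.dvd (show Int.ModEq p y x from hmod.symm)
  have hnsum : ¬ p ∣ x + y := by
    intro hsum
    have h2x : p ∣ 2 * x := by
      have : 2 * x = (x + y) + (x - y) := by ring
      rw [this]; exact dvd_add hsum hxy
    rcases hP.dvd_mul.mp h2x with h2 | hx
    · have := Int.le_of_dvd (by norm_num) h2; omega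
    · have h1 : p ∣ x * x + 1 := dvd_trans hpq hdx
      have hone : p ∣ 1 := by
        have := dvd_sub h1 (hx.mul_left x)
        simpa using this
      have := Int.le_of_dvd (by norm_num) hone; omega
  have hcop : IsCoprime q (x + y) := hq ▸ (hP.coprime_iff_not_dvd.mpr hnsum).pow_left
  have hdiff : q ∣ x - y := hcop.dvd_of_dvd_mul_right hdxy
  have : x - y = 0 := Int.eq_zero_of_abs_lt_dvd hdiff (abs_lt.mpr ⟨by omega, by omega⟩)
  omega

theorem astep (p r : Int) (j : Nat) (hp5 : 5 ≤ p) (hP : Prime p) (hj : 1 ≤ j)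
    (h0 : 0 ≤ r) (hlt : r < p ^ j) (hd : p ^ j ∣ r * r + 1) :
    0 ≤ r + PySem.Int.mod (-(PySem.Int.floordiv (r * r + 1) (p ^ j)) * pyInvMod (2 * r) p) p * p ^ j ∧
    r + PySem.Int.mod (-(PySem.Int.floordiv (r * r + 1) (p ^ j)) * pyInvMod (2 * r) p) p * p ^ j < p ^ (j + 1) ∧
    p ^ (j + 1) ∣ (r + PySem.Int.mod (-(PySem.Int.floordiv (r * r + 1) (p ^ j)) * pyInvMod (2 * r) p) p * p ^ j) *
      (r + PySem.Int.mod (-(PySem.Int.floordiv (r * r + 1) (p ^ j)) * pyInvMod (2 * r) p) p * p ^ j) + 1 ∧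
    (r + PySem.Int.mod (-(PySem.Int.floordiv (r * r + 1) (p ^ j)) * pyInvMod (2 * r) p) p * p ^ j) % p = r % p := by
  have hp0 : (0:Int) < p := by omega
  have hm0 : (0:Int) < p ^ j := pow_pos hp0 j
  have hpj : p ∣ p ^ j := dvd_pow_self p (by omega)
  set u := pyInvMod (2 * r) p with hu_def
  set c := PySem.Int.floordiv (r * r + 1) (p ^ j) with hc_def
  set t := PySem.Int.mod (-c * u) p with ht_def
  have ht : t = (-c * u) % p := by rw [ht_def, pymod_pos _ _ hp0]
  have ht0 : 0 ≤ t := by rw [ht]; exact Int.emod_nonneg _ hp0.ne'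
  have htp : t < p := by rw [ht]; exact Int.emod_lt_of_pos _ hp0
  have hc : c * p ^ j = r * r + 1 := by
    rw [hc_def, PySem.Int.floordiv, Int.fdiv_eq_ediv_of_nonneg _ hm0.le]
    exact Int.ediv_mul_cancel hd
  have hu : 2 * r * u % p = 1 % p := by
    rw [hu_def]
    exact pyInvMod_mul _ _ hp0 (by simpa using coprime_two_mul p r hp5 hP (dvd_trans hpj hd) 1)
  have h1 : p ∣ 1 - 2 * r * u := Int.ModEq.dvd (hu : Int.ModEq p (2*r*u) 1)
  have h2' : Int.ModEq p t (-c * u) := by rw [ht]; exact Int.emod_emod_of_dvd _ dvd_rfl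
  have h2 : p ∣ -c * u - t := h2'.dvd
  have hkey : p ∣ c + 2 * r * t := by
    have heq : c + 2 * r * t = c * (1 - 2 * r * u) - 2 * r * (-c * u - t) := by ring
    rw [heq]
    exact dvd_sub (Dvd.dvd.mul_left h1 c) (Dvd.dvd.mul_left h2 (2 * r))
  refine ⟨by positivity, ?_, ?_, ?_⟩
  · have h3 : t * p ^ j ≤ (p - 1) * p ^ j := mul_le_mul_of_nonneg_right (by omega) hm0.le
    have h4 : p ^ (j+1) = p * p ^ j := by rw [pow_succ]; ring
    nlinarith
  · obtain ⟨d, hdd⟩ := hkey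
    have hexp : (r + t * p ^ j) * (r + t * p ^ j) + 1
        = (c + 2 * r * t) * p ^ j + (t * t * p ^ (j-1)) * (p ^ j * p) := by
      have hjj : p ^ (j-1) * p = p ^ j := by
        rw [← pow_succ]; congr 1; omega
      calc (r + t * p ^ j) * (r + t * p ^ j) + 1
          = (r * r + 1) + 2 * r * t * p ^ j + t * t * (p ^ j * p ^ j) := by ring
        _ = (c + 2 * r * t) * p ^ j + (t * t * p ^ (j-1)) * (p ^ j * p) := by
            rw [← hc]; rw [show (t * t * p ^ (j-1)) * (p ^ j * p) = t * t * (p ^ j * (p ^ (j-1) * p)) by ring, hjj]; ring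
    rw [hexp, hdd]
    have h5 : p ^ (j+1) = p ^ j * p := pow_succ p j
    exact dvd_add ⟨d, by rw [h5]; ring⟩ ⟨t * t * p ^ (j-1), by rw [h5]; ring⟩
  · have hjj : t * p ^ j = p * (t * p ^ (j-1)) := by
      rw [show p * (t * p ^ (j-1)) = t * (p ^ (j-1) * p) by ring, ← pow_succ,
        show j - 1 + 1 = j by omega]
    rw [hjj, Int.add_mul_emod_self_left]

theorem aloop (p : Int) (hp5 : 5 ≤ p) (hP : Prime p) :
    ∀ (l : List Int) (r : Int) (j : Nat), 1 ≤ j → 0 ≤ r → r < p ^ j → p ^ j ∣ r * r + 1 →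
      let s := l.foldl (fun (s : Int × Int) _ =>
        let t := PySem.Int.mod (-(PySem.Int.floordiv (s.1 * s.1 + 1) s.2) * pyInvMod (2 * s.1) p) p
        (s.1 + t * s.2, s.2 * p)) (r, p ^ j)
      0 ≤ s.1 ∧ s.1 < p ^ (j + l.length) ∧ p ^ (j + l.length) ∣ s.1 * s.1 + 1 ∧ s.1 % p = r % p := by
  intro l
  induction l with
  | nil => intro r j hj h0 hlt hd; simpa using ⟨h0, hlt, hd⟩
  | cons a l ih =>
    intro r j hj h0 hlt hd
    obtain ⟨h0', hlt', hd', hmod'⟩ := astep p r j hp5 hP hj h0 hlt hd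
    have hstep : (List.foldl (fun (s : Int × Int) _ =>
        let t := PySem.Int.mod (-(PySem.Int.floordiv (s.1 * s.1 + 1) s.2) * pyInvMod (2 * s.1) p) p
        (s.1 + t * s.2, s.2 * p)) (r, p ^ j) (a :: l)) = (List.foldl (fun (s : Int × Int) _ =>
        let t := PySem.Int.mod (-(PySem.Int.floordiv (s.1 * s.1 + 1) s.2) * pyInvMod (2 * s.1) p) p
        (s.1 + t * s.2, s.2 * p))
        (r + PySem.Int.mod (-(PySem.Int.floordiv (r * r + 1) (p ^ j)) * pyInvMod (2 * r) p) p * p ^ j, p ^ (j+1)) l) := by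
      rw [List.foldl_cons]; rw [pow_succ]
    simp only [hstep]
    obtain ⟨g0, glt, gd, gmod⟩ := ih _ (j+1) (by omega) h0' hlt' hd'
    have hlen : j + 1 + l.length = j + (a :: l).length := by simp; omega
    rw [hlen] at glt gd
    exact ⟨g0, glt, gd, gmod.trans hmod'⟩

theorem nstep (p r : Int) (j : Nat) (hp5 : 5 ≤ p) (hP : Prime p) (hj : 1 ≤ j)
    (hd : p ^ j ∣ r * r + 1) :
    0 ≤ PySem.Int.mod (r - (r * r + 1) * pyInvMod (2 * r) (p ^ j * p ^ j)) (p ^ j * p ^ j) ∧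
    p ^ (2 * j) ∣ PySem.Int.mod (r - (r * r + 1) * pyInvMod (2 * r) (p ^ j * p ^ j)) (p ^ j * p ^ j) *
      PySem.Int.mod (r - (r * r + 1) * pyInvMod (2 * r) (p ^ j * p ^ j)) (p ^ j * p ^ j) + 1 ∧
    PySem.Int.mod (r - (r * r + 1) * pyInvMod (2 * r) (p ^ j * p ^ j)) (p ^ j * p ^ j) % p = r % p := by
  have hp0 : (0:Int) < p := by omega
  have h2j : p ^ j * p ^ j = p ^ (2 * j) := by rw [two_mul, pow_add]
  have hm0 : (0:Int) < p ^ j * p ^ j := by positivity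
  have hpj : p ∣ p ^ j := dvd_pow_self p (by omega)
  set u := pyInvMod (2 * r) (p ^ j * p ^ j) with hu_def
  have hu : 2 * r * u % (p ^ j * p ^ j) = 1 % (p ^ j * p ^ j) := by
    rw [hu_def]
    refine pyInvMod_mul _ _ hm0 ?_
    rw [h2j]
    exact coprime_two_mul p r hp5 hP (dvd_trans hpj hd) (2 * j)
  have h1 : p ^ j * p ^ j ∣ 1 - 2 * r * u := Int.ModEq.dvd (hu : Int.ModEq _ (2*r*u) 1)
  have hX : p ^ j * p ^ j ∣ (r - (r * r + 1) * u) * (r - (r * r + 1) * u) + 1 := by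
    have hexp : (r - (r * r + 1) * u) * (r - (r * r + 1) * u) + 1
        = (r * r + 1) * (1 - 2 * r * u) + ((r * r + 1) * (r * r + 1)) * (u * u) := by ring
    rw [hexp]
    exact dvd_add (Dvd.dvd.mul_left h1 _) (Dvd.dvd.mul_right (mul_dvd_mul hd hd) _)
  set X := r - (r * r + 1) * u with hX_def
  have hmodeq : PySem.Int.mod X (p ^ j * p ^ j) = X % (p ^ j * p ^ j) := pymod_pos _ _ hm0
  refine ⟨by rw [hmodeq]; exact Int.emod_nonneg _ hm0.ne', ?_, ?_⟩
  · rw [hmodeq, ← h2j]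
    exact dvd_sq_emod _ _ hX
  · rw [hmodeq]
    have hpm : p ∣ p ^ j * p ^ j := dvd_mul_of_dvd_left hpj _
    rw [Int.emod_emod_of_dvd _ hpm]
    have hsu : (r * r + 1) * u % p = 0 := by
      rw [Int.emod_eq_zero_of_dvd]
      exact Dvd.dvd.mul_right (dvd_trans hpj hd) u
    rw [hX_def, Int.sub_emod, hsu, sub_zero, Int.emod_emod_of_dvd _ dvd_rfl]

theorem bloop (p : Int) (hp5 : 5 ≤ p) (hP : Prime p) (en : Nat) :
    ∀ (f : Nat) (r : Int) (j : Nat), 1 ≤ j → 0 ≤ r → p ^ j ∣ r * r + 1 → en ≤ j * 2 ^ f →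
      0 ≤ pvNewtonLift (p ^ en) f r (p ^ j) ∧
      p ^ en ∣ pvNewtonLift (p ^ en) f r (p ^ j) * pvNewtonLift (p ^ en) f r (p ^ j) + 1 ∧
      pvNewtonLift (p ^ en) f r (p ^ j) % p = r % p := by
  intro f
  induction f with
  | zero =>
    intro r j hj h0 hd hle
    exact ⟨h0, dvd_trans (pow_dvd_pow p (by simpa using hle)) hd, rfl⟩
  | succ f ih =>
    intro r j hj h0 hd hle
    rw [pvNewtonLift]
    split_ifs with hlt
    · obtain ⟨n0, nd, nmod⟩ := nstep p r j hp5 hP hj hd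
      have h2j : p ^ j * p ^ j = p ^ (2 * j) := by rw [two_mul, pow_add]
      set r' := PySem.Int.mod (r - (r * r + 1) * pyInvMod (2 * r) (p ^ j * p ^ j)) (p ^ j * p ^ j) with hr'
      have hg := ih r' (2 * j) (by omega) n0 nd
        (by calc en ≤ j * 2 ^ (f+1) := hle
              _ = 2 * j * 2 ^ f := by ring)
      rw [← h2j] at hg
      exact ⟨hg.1, hg.2.1, hg.2.2.trans nmod⟩
    · have hje : en ≤ j := by
        have := (pow_le_pow_iff_right₀ (by omega : (1:Int) < p)).mp (not_lt.mp hlt)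
        exact this
      exact ⟨h0, dvd_trans (pow_dvd_pow p hje) hd, rfl⟩

def aRes (p e : Int) : Int :=
  ((PySem.List.pyRange 1 e 1).foldl (fun (s : Int × Int) _ =>
    let t := PySem.Int.mod (-(PySem.Int.floordiv (s.1 * s.1 + 1) s.2) * pyInvMod (2 * s.1) p) p
    (s.1 + t * s.2, s.2 * p)) (sqrt_minus_one_prime p, p)).1

def bRes (p e : Int) : Int :=
  PySem.Int.mod (pvNewtonLift (p ^ e.toNat) e.toNat (sqrt_minus_one_prime p) p) (p ^ e.toNat)

theorem A_eq (p e : Int) (hcnd : ¬ PySem.Int.mod p 4 = 3) :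
    roots_prime_power p e = ([aRes p e, p ^ e.toNat - aRes p e], p ^ e.toNat) := by
  simp only [roots_prime_power, aRes]
  rw [if_neg hcnd]

theorem B_eq (p e : Int) (hcnd : ¬ PySem.Int.mod p 4 = 3) :
    roots_prime_power_alt p e
      = ([bRes p e, PySem.Int.mod (p ^ e.toNat - bRes p e) (p ^ e.toNat)], p ^ e.toNat) := by
  simp only [roots_prime_power_alt, bRes, sqrt_minus_one_prime]
  rw [if_neg hcnd]

theorem main_eq (p e : Int) (he1 : 1 ≤ e) (hp4 : PySem.Int.mod p 4 = 1)
    (hPr : Nat.Prime p.toNat) : roots_prime_power p e = roots_prime_power_alt p e := by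
  have hmod4 : PySem.Int.mod p 4 = p % 4 := pymod_pos p 4 (by norm_num)
  have hp41 : p % 4 = 1 := by rw [← hmod4]; exact hp4
  have hp5 : (5:Int) ≤ p := by have := hPr.two_le; omega
  have hcnd : ¬ PySem.Int.mod p 4 = 3 := by rw [hmod4]; omega
  have hp0 : (0:Int) < p := by omega
  have hprime : Prime p := by
    have h := Nat.prime_iff_prime_int.mp hPr
    rwa [Int.toNat_of_nonneg hp0.le] at h
  set en := e.toNat with hen_def
  have hen1 : 1 ≤ en := by omega
  have hq0 : (0:Int) < p ^ en := pow_pos hp0 en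
  obtain ⟨hr00, hr0p, hr0d⟩ := r0_spec p hp5 hp41 hPr
  -- A-side value
  have hA := aloop p hp5 hprime (PySem.List.pyRange 1 e 1) (sqrt_minus_one_prime p) 1
    (le_refl 1) hr00 (by rwa [pow_one]) (by rwa [pow_one])
  rw [pow_one] at hA
  simp only [] at hA
  have hlen : 1 + (PySem.List.pyRange 1 e 1).length = en := by
    rw [len_pyRange e he1]; omega
  rw [hlen] at hA
  obtain ⟨ha0, halt, had, hamod⟩ := hA
  -- B-side value
  have hB := bloop p hp5 hprime en en (sqrt_minus_one_prime p) 1 (le_refl 1) hr00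
    (by rwa [pow_one]) (by simpa using Nat.lt_two_pow_self.le)
  rw [pow_one] at hB
  obtain ⟨hb0, hbd, hbmod⟩ := hB
  set rb := pvNewtonLift (p ^ en) en (sqrt_minus_one_prime p) p with hrb_def
  have hbres : bRes p e = rb % p ^ en := by rw [bRes, ← hen_def, pymod_pos _ _ hq0]
  have hbres0 : 0 ≤ bRes p e := by rw [hbres]; exact Int.emod_nonneg _ hq0.ne'
  have hbreslt : bRes p e < p ^ en := by rw [hbres]; exact Int.emod_lt_of_pos _ hq0
  have hbresd : p ^ en ∣ bRes p e * bRes p e + 1 := by rw [hbres]; exact dvd_sq_emod _ _ hbd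
  have hbresmod : bRes p e % p = sqrt_minus_one_prime p % p := by
    rw [hbres, Int.emod_emod_of_dvd _ (dvd_pow_self p (by omega))]
    exact hbmod
  -- they coincide
  have hxy : aRes p e = bRes p e :=
    unique_root p (p ^ en) (aRes p e) (bRes p e) hp5 hprime en hen1 rfl
      ha0 halt hbres0 hbreslt had hbresd (hamod.trans hbresmod.symm)
  -- second components
  have hq1 : (1:Int) < p ^ en := by
    calc (1:Int) < p := by omega
      _ ≤ p ^ en := le_self_pow₀ (by omega) (by omega)
  have hne : bRes p e ≠ 0 := by
    intro h0
    rw [h0] at hbresd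
    have h1 : p ^ en ∣ 1 := by simpa using hbresd
    have := Int.le_of_dvd (by norm_num) h1
    omega
  have hsecond : PySem.Int.mod (p ^ e.toNat - bRes p e) (p ^ e.toNat) = p ^ e.toNat - bRes p e := by
    rw [← hen_def, pymod_pos _ _ hq0]
    exact Int.emod_eq_of_lt (by omega) (by omega)
  rw [A_eq p e hcnd, B_eq p e hcnd, hsecond, ← hen_def, hxy]


theorem roots_prime_power_tight_aux (p : Int) (hp4 : PySem.Int.mod p 4 = 1)
    (hPr : Nat.Prime p.toNat) : roots_prime_power p 0 ≠ roots_prime_power_alt p 0 := by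
  have hmod4 : PySem.Int.mod p 4 = p % 4 := pymod_pos p 4 (by norm_num)
  have hp41 : p % 4 = 1 := by rw [← hmod4]; exact hp4
  have hp5 : (5:Int) ≤ p := by have := hPr.two_le; omega
  have hcnd : ¬ PySem.Int.mod p 4 = 3 := by rw [hmod4]; omega
  obtain ⟨hr00, hr0p, hr0d⟩ := r0_spec p hp5 hp41 hPr
  have hr0ne : sqrt_minus_one_prime p ≠ 0 := by
    intro h0
    rw [h0] at hr0d
    have h1 : p ∣ 1 := by simpa using hr0d
    have := Int.le_of_dvd (by norm_num) h1
    omega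
  have haRes : aRes p 0 = sqrt_minus_one_prime p := by
    simp [aRes, PySem.List.pyRange]
  have hbRes : bRes p 0 = 0 := by
    rw [bRes]
    show PySem.Int.mod (pvNewtonLift (p ^ (0:Nat)) 0 (sqrt_minus_one_prime p) p) (p ^ (0:Nat)) = 0
    show PySem.Int.mod (sqrt_minus_one_prime p) (p ^ (0:Nat)) = 0
    rw [pow_zero, pymod_pos _ _ (by norm_num), Int.emod_one]
  intro h
  rw [A_eq p 0 hcnd, B_eq p 0 hcnd, haRes, hbRes] at h
  simp only [Prod.mk.injEq, List.cons.injEq] at h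
  exact hr0ne h.1.1

theorem roots_prime_power_equal_case3 (p e : Int) (h3 : PySem.Int.mod p 4 = 3) :
    roots_prime_power p e = roots_prime_power_alt p e := by
  simp only [roots_prime_power, roots_prime_power_alt]
  rw [if_pos h3, if_pos h3]

-- ===== VERDICT (by name: the statement is the Claim_ definition above) =====
theorem roots_prime_power_spec : Claim_unchanged_roots_prime_power := by
  intro p e _hdom hpre hnd
  obtain ⟨he0, hcase⟩ := hpre
  rcases hcase with h3 | ⟨h1, hPr⟩
  · exact roots_prime_power_equal_case3 p e h3
  · have he1 : 1 ≤ e := by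
      rcases eq_or_ne e 0 with h | h
      · exact absurd ⟨h, h1, hPr⟩ hnd
      · omega
    exact main_eq p e he1 h1 hPr

theorem roots_prime_power_changed : Claim_changed_roots_prime_power := by
  unfold Claim_changed_roots_prime_power; decide

theorem roots_prime_power_tight : Claim_exact_roots_prime_power := by
  intro p e _hdom _hpre hd
  obtain ⟨he0, hp4, hPr⟩ := hd
  subst he0
  exact roots_prime_power_tight_aux p hp4 hPr
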